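-- pv_equiv track=rewrite | github.com/SvarunSoda/CalTech_LFC | Flattener_Simulation/utils/utils_fx.py | Utils_GenerateOccurenceList
-- ===== SOURCE A (Python) =====
-- def Utils_GenerateOccurenceList(lists):
-- #{
--     occurenceList = [sorted(Utils_UnionLists(lists)), []]
--
--     for i in range(len(occurenceList[0])):
--         occurenceList[1].append(0)
--
--     for i in range(len(lists)):
--     #{
--         currList = lists[i]
--
--         for j in range(len(currList)):
--         #{
--             currWord = currList[j]
--
--             occurenceList[1][Utils_FindInList(occurenceList[0], currWord)] += 1
--         #}
--     #}
--
--     return occurenceList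
--
-- def Utils_UnionLists(lists):
-- #{
--     if (len(lists) == 0):
--         raise ValueError("Attempting to get union of no lists!")
--
--     union = []
--
--     for i in range(len(lists)):
--     #{
--         currList = lists[i]
--
--         for j in range(len(currList)):
--         #{
--             currSearchValue = currList[j]
--
--             if (Utils_FindInList(union, currSearchValue) == -1):
--                 union.append(currSearchValue)
--         #}
--     #}
--
--     return union
--
-- def Utils_FindInList(list, value):
-- #{
--     for i in range(len(list)):
--         if (list[i] == value):
--             return i
--
--     return -1
-- ===== SOURCE B (Python) =====
-- def Utils_GenerateOccurenceList(lists):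
--     flat = sorted(x for sub in lists for x in sub)
--     keys, counts = _rle(flat)
--     return [keys, counts]
--
-- def _rle(xs):
--     if not xs:
--         return [], []
--     x = xs[0]
--     i = 1
--     while i < len(xs) and xs[i] == x:
--         i += 1
--     keys, counts = _rle(xs[i:])
--     return [x] + keys, [i] + counts
-- ===== Notes on version B (the rewrite author's own statement) =====
-- stated objective: faster
-- what changed: Replaces the quadratic union-building with linear FindInList scans and positional increment passes by a single sort of the flattened multiset followed by one run-length pass; B also returns [[],[]] on empty input where A raises.
-- outside the precondition, e.g. on Utils_GenerateOccurenceList([]): A raises ValueError, B returns [[], []]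
import Mathlib
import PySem

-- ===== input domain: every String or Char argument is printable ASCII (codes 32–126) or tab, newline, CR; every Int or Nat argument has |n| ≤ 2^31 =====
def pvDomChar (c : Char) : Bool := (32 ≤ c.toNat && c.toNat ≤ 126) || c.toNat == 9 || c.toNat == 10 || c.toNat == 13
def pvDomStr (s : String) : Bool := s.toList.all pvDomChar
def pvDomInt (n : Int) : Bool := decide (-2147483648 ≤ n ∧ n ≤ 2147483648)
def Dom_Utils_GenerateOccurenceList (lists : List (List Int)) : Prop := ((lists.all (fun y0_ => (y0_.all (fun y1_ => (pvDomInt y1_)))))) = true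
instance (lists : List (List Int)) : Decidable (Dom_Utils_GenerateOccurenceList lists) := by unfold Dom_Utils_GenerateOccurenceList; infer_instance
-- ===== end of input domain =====

-- B replaces A's quadratic union-building and positional increment scans by sort-then-run-length-count (one honest line: faster algorithm).
-- ===== PORT A =====
-- Utils_FindInList: linear scan returning the first index or -1
def pvFindAux (v : Int) (i : Int) : List Int → Int
  | [] => -1
  | x :: xs => if x == v then i else pvFindAux v (i + 1) xs

def pvFindInList (l : List Int) (v : Int) : Int := pvFindAux v 0 l

-- Utils_UnionLists: nested loops appending unseen values (the ValueError on [] is excluded by Pre_)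
def pvUnionLists (lists : List (List Int)) : List Int :=
  lists.foldl (fun union currList =>
    currList.foldl (fun union w =>
      if pvFindInList union w == -1 then union ++ [w] else union) union) []

def Utils_GenerateOccurenceList (lists : List (List Int)) : List (List Int) :=
  let keys := PySem.List.sorted (pvUnionLists lists) (fun x => x) false
  let counts0 := (PySem.List.pyRange 0 keys.length 1).foldl (fun acc _ => acc ++ [(0 : Int)]) []
  let counts := lists.foldl (fun counts currList =>
    currList.foldl (fun counts w =>
      PySem.List.pySetD counts (pvFindInList keys w)
        (PySem.List.pyGetD counts (pvFindInList keys w) 0 + 1)) counts) counts0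
  [keys, counts]

-- ===== PORT B =====
-- _rle: recursive run-length encoding of a list (the while loop over equal heads is takeWhile/dropWhile)
def pvRle (ys : List Int) : List Int × List Int :=
  match ys with
  | [] => ([], [])
  | x :: xs =>
    let run := xs.takeWhile (fun y => y == x)
    let rest := xs.dropWhile (fun y => y == x)
    let kc := pvRle rest
    (x :: kc.1, ((run.length : Int) + 1) :: kc.2)
termination_by ys.length
decreasing_by
  have := List.length_dropWhile_le (fun y => y == x) xs
  simp only [List.length_cons]
  omega

def Utils_GenerateOccurenceList_alt (lists : List (List Int)) : List (List Int) :=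
  let flat := lists.flatMap (fun sub => sub)
  let srt := PySem.List.sorted flat (fun x => x) false
  let kc := pvRle srt
  [kc.1, kc.2]

-- ===== PRECONDITION & SPEC =====
-- Pre_ excludes exactly lists = [], where the Python A raises ValueError.
def Pre_Utils_GenerateOccurenceList (lists : List (List Int)) : Prop := lists ≠ []
instance (lists : List (List Int)) : Decidable (Pre_Utils_GenerateOccurenceList lists) := by unfold Pre_Utils_GenerateOccurenceList; infer_instance
def pvWitness_Utils_GenerateOccurenceList : List (List Int) := [[1, 2], [2]]

def Spec_Utils_GenerateOccurenceList (lists : List (List Int)) (out : List (List Int)) : Prop := out = Utils_GenerateOccurenceList_alt lists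
instance (lists : List (List Int)) (out : List (List Int)) : Decidable (Spec_Utils_GenerateOccurenceList lists out) := by unfold Spec_Utils_GenerateOccurenceList; infer_instance

-- ===== CLAIM (what is proved, stated in full; the proofs are below) =====
def Claim_equal_Utils_GenerateOccurenceList : Prop := ∀ (lists : List (List Int)), Dom_Utils_GenerateOccurenceList lists → Pre_Utils_GenerateOccurenceList lists → Spec_Utils_GenerateOccurenceList lists (Utils_GenerateOccurenceList lists)

-- ===== LEMMAS AND PROOFS =====

theorem pvFindAux_eq (v : Int) (u : List Int) : ∀ i : Int,
    pvFindAux v i u = if v ∈ u then i + (u.idxOf v : Int) else -1 := by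
  induction u with
  | nil => intro i; simp [pvFindAux]
  | cons x xs ih =>
    intro i
    simp only [pvFindAux]
    by_cases hx : (x == v) = true
    · have hxv : x = v := by simpa using hx
      subst hxv
      simp
    · have hxv : ¬ v = x := fun h => hx (by simp [h])
      rw [if_neg hx, ih (i + 1)]
      have hidx : List.idxOf v (x :: xs) = List.idxOf v xs + 1 := by
        simp [List.idxOf_cons, hx]
      by_cases hm : v ∈ xs
      · simp only [List.mem_cons, hm, or_true, if_true, hidx]
        push_cast
        ring
      · simp [hm, hxv]

theorem pvFind_mem {u : List Int} {v : Int} (h : v ∈ u) :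
    pvFindInList u v = (u.idxOf v : Int) := by
  simp [pvFindInList, pvFindAux_eq, h]

theorem pvFind_not_mem {u : List Int} {v : Int} (h : v ∉ u) :
    pvFindInList u v = -1 := by
  simp [pvFindInList, pvFindAux_eq, h]

-- nested loop over the lists = one loop over the flattened list
theorem foldl_foldl_flatMap {β : Type} (lists : List (List Int)) (g : β → Int → β) (init : β) :
    lists.foldl (fun acc l => l.foldl g acc) init
      = (lists.flatMap (fun sub => sub)).foldl g init := by
  induction lists generalizing init with
  | nil => rfl
  | cons l ls ih => simp [List.flatMap_cons, List.foldl_append, ih]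

def pvUStep (u : List Int) (w : Int) : List Int :=
  if pvFindInList u w == -1 then u ++ [w] else u

theorem union_foldl_spec (ws : List Int) : ∀ u : List Int, u.Nodup →
    (ws.foldl pvUStep u).Nodup ∧ ∀ x, (x ∈ ws.foldl pvUStep u ↔ x ∈ u ∨ x ∈ ws) := by
  induction ws with
  | nil => intro u hu; simp [hu]
  | cons w ws ih =>
    intro u hu
    have hstep : (pvUStep u w).Nodup ∧ ∀ x, (x ∈ pvUStep u w ↔ x ∈ u ∨ x = w) := by
      by_cases hm : w ∈ u
      · have hne : ¬ ((u.idxOf w : Int) == -1) = true := by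
          simp only [beq_iff_eq]
          omega
        rw [pvUStep, pvFind_mem hm, if_neg hne]
        refine ⟨hu, fun x => ?_⟩
        constructor
        · exact Or.inl
        · rintro (h | rfl)
          · exact h
          · exact hm
      · rw [pvUStep, pvFind_not_mem hm, if_pos (by decide)]
        refine ⟨?_, fun x => by simp⟩
        have : ¬ ∃ a ∈ u, a = w := by
          rintro ⟨a, ha, rfl⟩
          exact hm ha
        simp [List.nodup_append, hu]
        intro a ha h
        exact this ⟨a, ha, h⟩
    obtain ⟨hn, hmem⟩ := hstep
    obtain ⟨hn', hmem'⟩ := ih (pvUStep u w) hn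
    refine ⟨hn', fun x => ?_⟩
    rw [List.foldl_cons, hmem' x, hmem x]
    simp
    tauto

-- run-length encoding of a (≤)-sorted list: strictly increasing keys, same members, counts
theorem pvRle_spec (ys : List Int) (hs : ys.Pairwise (· ≤ ·)) :
    (pvRle ys).1.Pairwise (· < ·) ∧ (∀ x, x ∈ (pvRle ys).1 ↔ x ∈ ys) ∧
      (pvRle ys).2 = (pvRle ys).1.map (fun k => (ys.count k : Int)) := by
  induction ys using pvRle.induct with
  | case1 => simp [pvRle]
  | case2 x xs rest ih =>
    have hunfold : pvRle (x :: xs) =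
        (x :: (pvRle rest).1,
          (((xs.takeWhile (fun y => y == x)).length : Int) + 1) :: (pvRle rest).2) := by
      rw [pvRle]
    have hxs : ∀ z ∈ xs, x ≤ z := (List.pairwise_cons.mp hs).1
    have hxsp : xs.Pairwise (· ≤ ·) := (List.pairwise_cons.mp hs).2
    have hrestsub : rest.Sublist xs := List.dropWhile_sublist _
    have hrestp : rest.Pairwise (· ≤ ·) := hxsp.sublist hrestsub
    have hgt : ∀ z ∈ rest, x < z := by
      intro z hz
      cases hr : rest with
      | nil => rw [hr] at hz; simp at hz
      | cons r rs =>
        have hr' : List.dropWhile (fun y => y == x) xs = r :: rs := hr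
        have hne : List.dropWhile (fun y => y == x) xs ≠ [] := by rw [hr']; simp
        have hrx : (r == x) = false := by
          have := List.head_dropWhile_not (fun y => y == x) hne
          rwa [show (List.dropWhile (fun y => y == x) xs).head hne = r from by simp [hr']] at this
        have hxr : x < r :=
          lt_of_le_of_ne (hxs r (hrestsub.subset (by rw [hr]; exact List.mem_cons_self)))
            (fun h => by simp [h.symm] at hrx)
        rcases (by rw [hr] at hz; simpa using hz : z = r ∨ z ∈ rs) with rfl | hzs
        · exact hxr
        · have hrz : r ≤ z := by
            have hp := hrestp
            rw [hr] at hp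
            exact (List.pairwise_cons.mp hp).1 z hzs
          exact lt_of_lt_of_le hxr hrz
    have hrunx : ∀ z ∈ xs.takeWhile (fun y => y == x), z = x :=
      fun z hz => by simpa using List.mem_takeWhile_imp hz
    have hsplit : xs = xs.takeWhile (fun y => y == x) ++ rest :=
      (List.takeWhile_append_dropWhile).symm
    obtain ⟨ihp, ihm, ihc⟩ := ih hrestp
    refine ⟨?_, ?_, ?_⟩
    · rw [hunfold]
      exact List.pairwise_cons.mpr ⟨fun z hz => hgt z ((ihm z).mp hz), ihp⟩
    · intro z
      rw [hunfold]
      simp only [List.mem_cons, ihm z]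
      constructor
      · rintro (rfl | hz)
        · exact Or.inl rfl
        · exact Or.inr (hrestsub.subset hz)
      · rintro (rfl | hz)
        · exact Or.inl rfl
        · rw [hsplit] at hz
          rcases List.mem_append.mp hz with hz | hz
          · exact Or.inl (hrunx z hz)
          · exact Or.inr hz
    · rw [hunfold]
      simp only [List.map_cons, List.cons.injEq]
      constructor
      · have h1 : List.count x (xs.takeWhile (fun y => y == x)) =
            (xs.takeWhile (fun y => y == x)).length :=
          List.count_eq_length.mpr (fun b hb => by simp [hrunx b hb])
        have h2 : List.count x rest = 0 :=
          List.count_eq_zero.mpr (fun h => lt_irrefl x (hgt x h))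
        have hc : List.count x (x :: xs) = (List.takeWhile (fun y => y == x) xs).length + 1 := by
          rw [List.count_cons_self]
          conv_lhs => rw [hsplit]
          rw [List.count_append, h1, h2]
        rw [hc]
        push_cast
        ring
      · rw [ihc]
        refine List.map_congr_left (fun k hk => ?_)
        have hkrest : k ∈ rest := (ihm k).mp hk
        have hkx : ¬ (x = k) := fun h => lt_irrefl x (h ▸ hgt k hkrest)
        have h0 : List.count k (xs.takeWhile (fun y => y == x)) = 0 :=
          List.count_eq_zero.mpr (fun h => hkx (hrunx k h).symm)
        have hc : List.count k (x :: xs) = List.count k rest := by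
          rw [List.count_cons_of_ne hkx]
          conv_lhs => rw [hsplit]
          rw [List.count_append, h0]
          simp
        rw [hc]


theorem count_foldl_spec (K : List Int) (hK : K.Nodup) (ws : List Int)
    (hws : ∀ w ∈ ws, w ∈ K) : ∀ acc : List Int, acc.length = K.length →
    ws.foldl (fun counts w =>
      PySem.List.pySetD counts (pvFindInList K w)
        (PySem.List.pyGetD counts (pvFindInList K w) 0 + 1)) acc
      = List.zipWith (fun a k => a + (List.count k ws : Int)) acc K := by
  induction ws with
  | nil =>
    intro acc hlen
    apply List.ext_getElem
    · simp [hlen]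
    · intro i h1 h2
      simp
  | cons w ws ih =>
    intro acc hlen
    have hw : w ∈ K := hws w List.mem_cons_self
    have hj : K.idxOf w < K.length := List.idxOf_lt_length_of_mem hw
    have hstep : PySem.List.pySetD acc (pvFindInList K w)
        (PySem.List.pyGetD acc (pvFindInList K w) 0 + 1)
        = acc.set (K.idxOf w) (acc[K.idxOf w]'(by omega) + 1) := by
      rw [pvFind_mem hw, PySem.List.pySetD_natCast, PySem.List.pyGetD_natCast,
        List.getD_eq_getElem acc 0 (by omega)]
    rw [List.foldl_cons, hstep,
      ih (fun v hv => hws v (List.mem_cons_of_mem w hv)) _ (by simp [hlen])]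
    apply List.ext_getElem
    · simp [hlen]
    · intro i h1 h2
      have h2' : i < acc.length ∧ i < K.length := by simpa using h2
      have hiK : i < K.length := h2'.2
      have hiacc : i < acc.length := h2'.1
      simp only [List.getElem_zipWith, List.getElem_set]
      by_cases hij : K.idxOf w = i
      · subst hij
        have hKj : K[K.idxOf w] = w := List.getElem_idxOf hj
        rw [if_pos rfl, hKj, List.count_cons_self]
        push_cast
        ring
      · rw [if_neg hij]
        have hKne : ¬ (w == K[i]) = true := by
          simp only [beq_iff_eq]
          intro h
          have : K[K.idxOf w] = K[i] := by rw [List.getElem_idxOf hj, h]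
          exact hij ((List.Nodup.getElem_inj_iff hK).mp this)
        rw [List.count_cons, if_neg hKne]
        push_cast
        ring

theorem zipWith_replicate_zero (K : List Int) (c : Int → Int) :
    List.zipWith (fun a k => a + c k) (List.replicate K.length 0) K
      = K.map (fun k => c k) := by
  apply List.ext_getElem
  · simp
  · intro i h1 h2
    simp

-- ===== VERDICT (by name: the statement is the Claim_ definition above) =====
theorem Utils_GenerateOccurenceList_spec : Claim_equal_Utils_GenerateOccurenceList := by
  intro lists _ _
  unfold Spec_Utils_GenerateOccurenceList Utils_GenerateOccurenceList Utils_GenerateOccurenceList_alt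
  simp only []
  set flat := lists.flatMap (fun sub => sub) with hflat
  -- A's union, characterised
  have hU : pvUnionLists lists = flat.foldl pvUStep [] := by
    rw [pvUnionLists, foldl_foldl_flatMap]
    rfl
  obtain ⟨hUnodup, hUmem⟩ := union_foldl_spec flat [] List.nodup_nil
  rw [← hU] at hUnodup hUmem
  have hUmem' : ∀ x, x ∈ pvUnionLists lists ↔ x ∈ flat := by
    intro x
    rw [hUmem x]
    simp
  -- B's keys, characterised
  have hsp : (PySem.List.sorted flat (fun x => x)).Pairwise (· ≤ ·) :=
    PySem.List.sorted_pairwise flat (fun x => x)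
  obtain ⟨hKp, hKm, hKc⟩ := pvRle_spec (PySem.List.sorted flat (fun x => x)) hsp
  have hKnodup : (pvRle (PySem.List.sorted flat (fun x => x))).1.Nodup :=
    hKp.imp (fun h => ne_of_lt h)
  have hKmem : ∀ x, x ∈ (pvRle (PySem.List.sorted flat (fun x => x))).1 ↔ x ∈ flat := by
    intro x
    rw [hKm x, PySem.List.mem_sorted]
  -- the two key lists coincide
  have hperm : (pvRle (PySem.List.sorted flat (fun x => x))).1.Perm (pvUnionLists lists) :=
    (List.perm_ext_iff_of_nodup hKnodup hUnodup).mpr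
      (fun a => by rw [hKmem a, hUmem' a])
  have hkeys : PySem.List.sorted (pvUnionLists lists) (fun x => x)
      = (pvRle (PySem.List.sorted flat (fun x => x))).1 :=
    PySem.List.sorted_eq_of_perm_of_pairwise_lt _ _ (fun x => x) hperm hKp
  rw [hkeys]
  -- the zero-initialised counts list
  have hzeros : (PySem.List.pyRange 0 ((pvRle (PySem.List.sorted flat (fun x => x))).1.length) 1).foldl
      (fun acc _ => acc ++ [(0 : Int)]) []
      = List.replicate ((pvRle (PySem.List.sorted flat (fun x => x))).1.length) (0 : Int) := by
    have h := PySem.List.foldl_append_singleton_eq_map (fun _ : Int => (0 : Int))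
      (PySem.List.pyRange 0 ((pvRle (PySem.List.sorted flat (fun x => x))).1.length) 1) []
    rw [h, List.map_const']
    simp [PySem.List.length_pyRange_one]
  rw [hzeros]
  -- A's counting loop, flattened and characterised
  rw [foldl_foldl_flatMap, ← hflat,
    count_foldl_spec _ hKnodup flat (fun w hw => (hKmem w).mpr hw) _ (by simp),
    zipWith_replicate_zero, hKc]
  -- B's counts count in sorted(flat) = counts in flat
  have : ∀ k, List.count k (PySem.List.sorted flat (fun x => x)) = List.count k flat :=
    fun k => (PySem.List.sorted_perm flat (fun x => x) false).count_eq k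
  simp only [this]
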